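-- pv_equiv track=rewrite | github.com/PC-Thien-TS/ai-test-system | orchestrator/adapters/rankmate/risk_rules.py | map_defect_to_flows
-- ===== SOURCE A (Python) =====
-- def map_defect_to_flows(finding_id: str, title: str) -> list[str]:
--     text = f"{finding_id} {title}".lower()
--     flows: list[str] = []
--     if any(token in text for token in ("store", "search", "sto-", "store-api")):
--         flows.append("search_discovery")
--     if any(token in text for token in ("merchant", "mer-")):
--         flows.append("merchant_handling")
--     if any(token in text for token in ("payment", "pay-api", "stripe", "momo")):
--         flows.append("payment_integrity")
--     if any(token in text for token in ("auth", "login", "token")):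
--         flows.append("auth_foundation")
--     if any(token in text for token in ("order", "ord-")):
--         flows.append("order_core")
--     if any(token in text for token in ("admin", "consistency", "aord-")):
--         flows.append("admin_consistency")
--     return sorted(set(flows))
-- ===== SOURCE B (Python) =====
-- # Position-driven multi-pattern scan: walk the text once and, at each index,
-- # look up which tokens start there via a token->flow map, collecting flows in a set.
-- _TOKEN_FLOW = {
--     "store": "search_discovery",
--     "search": "search_discovery",
--     "sto-": "search_discovery",
--     "store-api": "search_discovery",
--     "merchant": "merchant_handling",
--     "mer-": "merchant_handling",
--     "payment": "payment_integrity",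
--     "pay-api": "payment_integrity",
--     "stripe": "payment_integrity",
--     "momo": "payment_integrity",
--     "auth": "auth_foundation",
--     "login": "auth_foundation",
--     "token": "auth_foundation",
--     "order": "order_core",
--     "ord-": "order_core",
--     "admin": "admin_consistency",
--     "consistency": "admin_consistency",
--     "aord-": "admin_consistency",
-- }
--
-- def map_defect_to_flows(finding_id: str, title: str) -> list[str]:
--     text = (finding_id + " " + title).lower()
--     flows = set()
--     for i in range(len(text)):
--         for tok, flow in _TOKEN_FLOW.items():
--             if text.startswith(tok, i):
--                 flows.add(flow)
--     return sorted(flows)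
-- ===== Notes on version B (the rewrite author's own statement) =====
-- stated objective: alternative
-- what changed: Inverted the control flow: instead of six per-flow any(token in text) substring searches plus sorted(set(...)), B builds a token->flow map and scans the text positions once, at each index checking which tokens start there and collecting the matched flows into a set.
import Mathlib
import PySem

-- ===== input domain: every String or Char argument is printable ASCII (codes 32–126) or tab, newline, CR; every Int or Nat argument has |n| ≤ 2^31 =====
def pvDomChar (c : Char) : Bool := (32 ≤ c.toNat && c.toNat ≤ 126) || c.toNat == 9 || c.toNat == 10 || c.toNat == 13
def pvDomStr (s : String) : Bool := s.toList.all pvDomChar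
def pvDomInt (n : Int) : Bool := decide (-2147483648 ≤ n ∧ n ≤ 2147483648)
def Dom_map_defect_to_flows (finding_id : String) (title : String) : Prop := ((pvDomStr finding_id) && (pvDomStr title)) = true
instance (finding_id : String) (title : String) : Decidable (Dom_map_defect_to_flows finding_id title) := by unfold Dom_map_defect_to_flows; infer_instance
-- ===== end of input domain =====

-- B inverts the control flow: a position-driven scan of the text with a token->flow map
-- replaces A's six per-flow substring searches (alternative decomposition, same result).

-- ===== PORT A =====
def map_defect_to_flows (finding_id : String) (title : String) : List String :=
  let text := PySem.Chars.lower (finding_id.toList ++ ' ' :: title.toList)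
  let flows : List String := []
  let flows := if (["store", "search", "sto-", "store-api"].any fun tok => PySem.Chars.isIn tok.toList text)
    then flows ++ ["search_discovery"] else flows
  let flows := if (["merchant", "mer-"].any fun tok => PySem.Chars.isIn tok.toList text)
    then flows ++ ["merchant_handling"] else flows
  let flows := if (["payment", "pay-api", "stripe", "momo"].any fun tok => PySem.Chars.isIn tok.toList text)
    then flows ++ ["payment_integrity"] else flows
  let flows := if (["auth", "login", "token"].any fun tok => PySem.Chars.isIn tok.toList text)
    then flows ++ ["auth_foundation"] else flows
  let flows := if (["order", "ord-"].any fun tok => PySem.Chars.isIn tok.toList text)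
    then flows ++ ["order_core"] else flows
  let flows := if (["admin", "consistency", "aord-"].any fun tok => PySem.Chars.isIn tok.toList text)
    then flows ++ ["admin_consistency"] else flows
  PySem.List.sorted (PySem.Set.ofList flows) (fun x => x) false

-- ===== PORT B =====
-- the module-level token -> flow dict, in insertion order
def pvTokenFlow : List (String × String) :=
  [ ("store", "search_discovery"), ("search", "search_discovery"),
    ("sto-", "search_discovery"), ("store-api", "search_discovery"),
    ("merchant", "merchant_handling"), ("mer-", "merchant_handling"),
    ("payment", "payment_integrity"), ("pay-api", "payment_integrity"),
    ("stripe", "payment_integrity"), ("momo", "payment_integrity"),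
    ("auth", "auth_foundation"), ("login", "auth_foundation"),
    ("token", "auth_foundation"),
    ("order", "order_core"), ("ord-", "order_core"),
    ("admin", "admin_consistency"), ("consistency", "admin_consistency"),
    ("aord-", "admin_consistency") ]

def map_defect_to_flows_alt (finding_id : String) (title : String) : List String :=
  let text := PySem.Chars.lower (finding_id.toList ++ ' ' :: title.toList)
  let flows : PySem.Set String :=
    (PySem.List.pyRange 0 (text.length : Int) 1).foldl
      (fun s i =>
        pvTokenFlow.foldl
          (fun s p =>
            -- text.startswith(tok, i): exact since range gives 0 ≤ i < len(text)
            if PySem.Chars.startswith (text.drop i.toNat) p.1.toList then PySem.Set.add s p.2 else s)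
          s)
      PySem.Set.empty
  PySem.List.sorted flows (fun x => x) false

-- ===== PRECONDITION & SPEC =====
def Spec_map_defect_to_flows (finding_id : String) (title : String) (out : List String) : Prop := out = map_defect_to_flows_alt finding_id title
instance (finding_id : String) (title : String) (out : List String) : Decidable (Spec_map_defect_to_flows finding_id title out) := by unfold Spec_map_defect_to_flows; infer_instance

-- ===== CLAIM (what is proved, stated in full; the proofs are below) =====
def Claim_equal_map_defect_to_flows : Prop := ∀ (finding_id : String) (title : String), Dom_map_defect_to_flows finding_id title → Spec_map_defect_to_flows finding_id title (map_defect_to_flows finding_id title)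

-- ===== LEMMAS AND PROOFS =====

-- membership in B's inner fold over the token table
lemma pv_mem_inner (x : String) (cond : String × String → Bool) :
    ∀ (l : List (String × String)) (s : PySem.Set String),
      (x ∈ l.foldl (fun s p => if cond p then PySem.Set.add s p.2 else s) s ↔
        x ∈ s ∨ ∃ p ∈ l, cond p = true ∧ x = p.2) := by
  intro l
  induction l with
  | nil => intro s; simp
  | cons hd tl ih =>
    intro s
    simp only [List.foldl_cons, ih, List.mem_cons]
    by_cases h : cond hd = true
    · simp [h, PySem.Set.mem_add, or_and_right, exists_or]
      tauto
    · simp [h, or_and_right, exists_or]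

lemma pv_nodup_inner (cond : String × String → Bool) :
    ∀ (l : List (String × String)) (s : PySem.Set String), s.Nodup →
      (l.foldl (fun s p => if cond p then PySem.Set.add s p.2 else s) s).Nodup := by
  intro l
  induction l with
  | nil => intro s hs; simpa
  | cons hd tl ih =>
    intro s hs
    simp only [List.foldl_cons]
    apply ih
    by_cases h : cond hd = true
    · simp [h]; exact PySem.Set.nodup_add s hd.2 hs
    · simpa [h]

-- membership in B's outer fold over the text positions
lemma pv_mem_outer (x : String) (text : List Char) :
    ∀ (idxs : List Int) (s : PySem.Set String),
      (x ∈ idxs.foldl (fun s i =>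
          pvTokenFlow.foldl (fun s p =>
            if PySem.Chars.startswith (text.drop i.toNat) p.1.toList then PySem.Set.add s p.2 else s) s) s ↔
        x ∈ s ∨ ∃ i ∈ idxs, ∃ p ∈ pvTokenFlow,
          PySem.Chars.startswith (text.drop i.toNat) p.1.toList = true ∧ x = p.2) := by
  intro idxs
  induction idxs with
  | nil => intro s; simp
  | cons hd tl ih =>
    intro s
    simp only [List.foldl_cons, ih, List.mem_cons,
      pv_mem_inner x (fun p => PySem.Chars.startswith (text.drop hd.toNat) p.1.toList)]
    constructor
    · rintro (⟨h | ⟨p, hp, hc, hx⟩⟩ | ⟨i, hi, h⟩)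
      · exact Or.inl h
      · exact Or.inr ⟨hd, Or.inl rfl, p, hp, hc, hx⟩
      · exact Or.inr ⟨i, Or.inr hi, h⟩
    · rintro (h | ⟨i, (rfl | hi), h⟩)
      · exact Or.inl (Or.inl h)
      · exact Or.inl (Or.inr h)
      · exact Or.inr ⟨i, hi, h⟩

-- a nonempty token starts at some scanned position iff it is a substring
lemma pv_exists_idx_iff_isIn (text tok : List Char) (h : tok ≠ []) :
    (∃ i ∈ PySem.List.pyRange 0 (text.length : Int) 1,
        PySem.Chars.startswith (text.drop i.toNat) tok = true) ↔
      PySem.Chars.isIn tok text = true := by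
  rw [← PySem.Chars.exists_prefix_drop_iff_isIn]
  constructor
  · rintro ⟨i, _, hs⟩
    exact ⟨i.toNat, (PySem.Chars.startswith_iff _ _).mp hs⟩
  · rintro ⟨j, hpre⟩
    by_cases hj : j < text.length
    · refine ⟨(j : Int), ?_, ?_⟩
      · exact PySem.List.mem_pyRange_one.mpr ⟨by positivity, by exact_mod_cast hj⟩
      · simpa using (PySem.Chars.startswith_iff _ _).mpr hpre
    · exfalso
      rw [List.drop_eq_nil_of_le (by omega)] at hpre
      exact h (List.prefix_nil.mp hpre)


lemma pv_nodup_outer (text : List Char) :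
    ∀ (idxs : List Int) (s : PySem.Set String), s.Nodup →
      (idxs.foldl (fun s i =>
        pvTokenFlow.foldl (fun s p =>
          if PySem.Chars.startswith (text.drop i.toNat) p.1.toList then PySem.Set.add s p.2 else s) s) s).Nodup := by
  intro idxs
  induction idxs with
  | nil => intro s hs; simpa
  | cons hd tl ih =>
    intro s hs
    simp only [List.foldl_cons]
    exact ih _ (pv_nodup_inner _ pvTokenFlow s hs)

-- the position/table double-∃ regrouped as A's six per-flow substring tests
lemma pv_exists_table (x : String) (text : List Char) :
    (∃ i ∈ PySem.List.pyRange 0 (text.length : Int) 1, ∃ p ∈ pvTokenFlow,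
        PySem.Chars.startswith (text.drop i.toNat) p.1.toList = true ∧ x = p.2) ↔
      (((["store", "search", "sto-", "store-api"].any fun tok => PySem.Chars.isIn tok.toList text) = true ∧ x = "search_discovery") ∨
       ((["merchant", "mer-"].any fun tok => PySem.Chars.isIn tok.toList text) = true ∧ x = "merchant_handling") ∨
       ((["payment", "pay-api", "stripe", "momo"].any fun tok => PySem.Chars.isIn tok.toList text) = true ∧ x = "payment_integrity") ∨
       ((["auth", "login", "token"].any fun tok => PySem.Chars.isIn tok.toList text) = true ∧ x = "auth_foundation") ∨
       ((["order", "ord-"].any fun tok => PySem.Chars.isIn tok.toList text) = true ∧ x = "order_core") ∨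
       ((["admin", "consistency", "aord-"].any fun tok => PySem.Chars.isIn tok.toList text) = true ∧ x = "admin_consistency")) := by
  have hswap : (∃ i ∈ PySem.List.pyRange 0 (text.length : Int) 1, ∃ p ∈ pvTokenFlow,
      PySem.Chars.startswith (text.drop i.toNat) p.1.toList = true ∧ x = p.2) ↔
      (∃ p ∈ pvTokenFlow, (∃ i ∈ PySem.List.pyRange 0 (text.length : Int) 1,
        PySem.Chars.startswith (text.drop i.toNat) p.1.toList = true) ∧ x = p.2) := by
    constructor
    · rintro ⟨i, hi, p, hp, hc, hx⟩; exact ⟨p, hp, ⟨i, hi, hc⟩, hx⟩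
    · rintro ⟨p, hp, ⟨i, hi, hc⟩, hx⟩; exact ⟨i, hi, p, hp, hc, hx⟩
  rw [hswap]
  simp only [pvTokenFlow, List.mem_cons, List.not_mem_nil, or_false, exists_eq_or_imp,
    exists_eq_left, List.any_cons, List.any_nil, Bool.or_eq_true]
  rw [pv_exists_idx_iff_isIn text "store".toList (by decide),
      pv_exists_idx_iff_isIn text "search".toList (by decide),
      pv_exists_idx_iff_isIn text "sto-".toList (by decide),
      pv_exists_idx_iff_isIn text "store-api".toList (by decide),
      pv_exists_idx_iff_isIn text "merchant".toList (by decide),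
      pv_exists_idx_iff_isIn text "mer-".toList (by decide),
      pv_exists_idx_iff_isIn text "payment".toList (by decide),
      pv_exists_idx_iff_isIn text "pay-api".toList (by decide),
      pv_exists_idx_iff_isIn text "stripe".toList (by decide),
      pv_exists_idx_iff_isIn text "momo".toList (by decide),
      pv_exists_idx_iff_isIn text "auth".toList (by decide),
      pv_exists_idx_iff_isIn text "login".toList (by decide),
      pv_exists_idx_iff_isIn text "token".toList (by decide),
      pv_exists_idx_iff_isIn text "order".toList (by decide),
      pv_exists_idx_iff_isIn text "ord-".toList (by decide),
      pv_exists_idx_iff_isIn text "admin".toList (by decide),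
      pv_exists_idx_iff_isIn text "consistency".toList (by decide),
      pv_exists_idx_iff_isIn text "aord-".toList (by decide)]
  simp only [or_and_right, or_assoc, Bool.false_eq_true, or_false]

-- membership in an 'append-if' step of A's flows list
lemma pv_mem_ite (b : Bool) (l : List String) (y x : String) :
    (x ∈ if b then l ++ [y] else l) ↔ x ∈ l ∨ (b = true ∧ x = y) := by
  cases b <;> simp

theorem map_defect_to_flows_spec : Claim_equal_map_defect_to_flows := by
  intro f t _
  unfold Spec_map_defect_to_flows map_defect_to_flows map_defect_to_flows_alt
  generalize PySem.Chars.lower (f.toList ++ ' ' :: t.toList) = text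
  apply PySem.List.sorted_eq_sorted_of_perm _ _ _ (fun a b hab => hab)
  rw [List.perm_ext_iff_of_nodup (PySem.Set.nodup_ofList _)
    (pv_nodup_outer text (PySem.List.pyRange 0 (text.length : Int) 1) PySem.Set.empty List.nodup_nil)]
  intro x
  rw [pv_mem_outer x text, PySem.Set.mem_ofList]
  simp only [PySem.Set.empty, List.not_mem_nil, false_or]
  rw [pv_exists_table]
  simp only [pv_mem_ite, List.not_mem_nil, false_or, or_assoc]
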